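-- pv_equiv track=rewrite | github.com/wnstjr9711/Study | 프로그래머스/ALL/숫자 게임.py | solution
-- ===== SOURCE A (Python) =====
-- import bisect
--
-- def solution(A, B):
--     answer = 0
--     B.sort()
--     for i in A:
--         idx = bisect.bisect_right(B, i)
--         if idx < len(B):
--             B.pop(idx)
--             answer += 1
--         else:
--             B.pop(0)
--     return answer
-- ===== SOURCE B (Python) =====
-- def solution(A, B):
--     # Two-pointer greedy over both lists sorted ascending (O(n log n)).
--     # Note: unlike the original, this does not mutate B in place; return value only.
--     a = sorted(A)
--     count = 0
--     for x in sorted(B):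
--         if count < len(a) and a[count] < x:
--             count += 1
--     return count
-- ===== Notes on version B (the rewrite author's own statement) =====
-- stated objective: faster
-- what changed: Replaces the per-element bisect + list.pop simulation on a mutating sorted B with a single two-pointer pass over both lists sorted once.
import Mathlib
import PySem

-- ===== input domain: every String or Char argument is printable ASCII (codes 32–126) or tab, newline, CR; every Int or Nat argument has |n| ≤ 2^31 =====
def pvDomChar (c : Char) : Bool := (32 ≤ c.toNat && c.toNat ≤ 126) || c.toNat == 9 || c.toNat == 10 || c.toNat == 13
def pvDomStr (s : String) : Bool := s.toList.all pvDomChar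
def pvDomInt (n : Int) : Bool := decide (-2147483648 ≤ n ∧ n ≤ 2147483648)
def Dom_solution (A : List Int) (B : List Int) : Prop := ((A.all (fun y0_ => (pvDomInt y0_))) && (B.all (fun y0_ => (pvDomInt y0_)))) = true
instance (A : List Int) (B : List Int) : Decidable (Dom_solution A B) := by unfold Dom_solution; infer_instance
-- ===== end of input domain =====

-- B replaces A's per-element bisect + pop simulation on a mutating sorted B with a single
-- two-pointer pass over both lists sorted once (faster, asymptotic). A sorts and pops the
-- caller's B in place; the equivalence proved here is about the RETURN value only.

-- ===== PORT A =====
-- the body of A's for-loop: idx = bisect_right(B, i); pop(idx) on a hit else pop(0).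
-- B.pop(idx) / B.pop(0) leave the list without that element (eraseIdx); B.pop(0) on an
-- empty B raises IndexError in Python — those inputs are excluded by Pre_solution, and
-- eraseIdx [] 0 = [] there.
def stepA (st : Int × List Int) (i : Int) : Int × List Int :=
  let idx := PySem.List.bisectRight st.2 i
  if idx < st.2.length then (st.1 + 1, st.2.eraseIdx idx) else (st.1, st.2.eraseIdx 0)

def solution (A : List Int) (B : List Int) : Int :=
  (A.foldl stepA (0, PySem.List.sorted B (fun b => b))).1

-- ===== PORT B =====
-- Source B's loop body: `if count < len(a) and a[count] < x: count += 1` (a[count] read via getD,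
-- exact because the read is guarded by count < len(a)).
def stepB (a : List Int) (c : Nat) (x : Int) : Nat :=
  if c < a.length ∧ a.getD c 0 < x then c + 1 else c

def solution_alt (A : List Int) (B : List Int) : Int :=
  let a := PySem.List.sorted A (fun v => v)
  ((PySem.List.sorted B (fun v => v)).foldl (stepB a) 0 : Nat)

-- ===== PRECONDITION & SPEC =====
-- Pre_ excludes exactly the inputs where A raises: with len(A) > len(B) the loop exhausts B
-- and B.pop(0) raises IndexError.
def Pre_solution (A : List Int) (B : List Int) : Prop := A.length ≤ B.length
instance (A : List Int) (B : List Int) : Decidable (Pre_solution A B) := by unfold Pre_solution; infer_instance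
def pvWitness_solution : List Int × List Int := ([3, 1, 2], [4, 2, 3])

def Spec_solution (A : List Int) (B : List Int) (out : Int) : Prop := out = solution_alt A B
instance (A : List Int) (B : List Int) (out : Int) : Decidable (Spec_solution A B out) := by unfold Spec_solution; infer_instance

-- ===== CLAIM (what is proved, stated in full; the proofs are below) =====
def Claim_equal_solution : Prop := ∀ (A : List Int) (B : List Int), Dom_solution A B → Pre_solution A B → Spec_solution A B (solution A B)
-- ===== LEMMAS AND PROOFS =====

-- one loop iteration of A, with the count contribution isolated
def stepN (bs : List Int) (i : Int) : Nat × List Int :=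
  if PySem.List.bisectRight bs i < bs.length
  then (1, bs.eraseIdx (PySem.List.bisectRight bs i)) else (0, bs.eraseIdx 0)

-- A's loop as structural recursion over A
def runN : List Int → List Int → Nat
  | [], _ => 0
  | i :: as, bs => (stepN bs i).1 + runN as (stepN bs i).2

-- B's two-pointer count as structural recursion
def tp : List Int → List Int → Nat
  | _, [] => 0
  | [], _ :: _ => 0
  | a :: as, x :: bs => if a < x then 1 + tp as bs else tp (a :: as) bs

lemma tp_nil (bs : List Int) : tp [] bs = 0 := by cases bs <;> rfl

-- ---- bisect characterisation on sorted lists ----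

lemma bisect_split_eq (S T : List Int) (x : Int)
    (hs : (S ++ T).Pairwise (· ≤ ·))
    (hS : ∀ s ∈ S, s ≤ x) (hT : ∀ t ∈ T, x < t) :
    PySem.List.bisectRight (S ++ T) x = S.length := by
  obtain ⟨h1, h2, h3⟩ := PySem.List.bisectRight_spec (S ++ T) x hs
  rcases Nat.lt_trichotomy (PySem.List.bisectRight (S ++ T) x) S.length with h | h | h
  · have hjl : PySem.List.bisectRight (S ++ T) x < (S ++ T).length := by
      simp only [List.length_append]; omega
    have hlt := h3 _ hjl (Nat.le_refl _)
    rw [List.getElem_append_left h] at hlt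
    exact absurd (hS _ (List.getElem_mem _)) (not_le.mpr hlt)
  · exact h
  · have hne : S.length < (S ++ T).length := Nat.lt_of_lt_of_le h h1
    have h2' := h2 S.length hne h
    rw [List.getElem_append_right (Nat.le_refl _)] at h2'
    exact absurd h2' (not_le.mpr (hT _ (List.getElem_mem _)))

lemma eraseIdx_append_len (S T : List Int) : (S ++ T).eraseIdx S.length = S ++ T.eraseIdx 0 := by
  induction S with
  | nil => simp
  | cons s S ih => simpa using ih

-- stepN on a list with no element greater than x: the bisect misses, pop(0)
lemma stepN_all_le (bs : List Int) (x : Int)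
    (hs : bs.Pairwise (· ≤ ·)) (h : ∀ b ∈ bs, b ≤ x) :
    stepN bs x = (0, bs.eraseIdx 0) := by
  have hk : PySem.List.bisectRight bs x = bs.length := by
    have := bisect_split_eq bs [] x (by simpa using hs) h (by simp)
    simpa using this
  unfold stepN
  rw [hk]
  simp

-- stepN on a decomposed sorted list with a first greater element b: it is removed
lemma stepN_split_cons (S : List Int) (b : Int) (T' : List Int) (x : Int)
    (hs : (S ++ b :: T').Pairwise (· ≤ ·))
    (hS : ∀ s ∈ S, s ≤ x) (hT : ∀ t ∈ b :: T', x < t) :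
    stepN (S ++ b :: T') x = (1, S ++ T') := by
  unfold stepN
  rw [bisect_split_eq S (b :: T') x hs hS hT]
  have hlt : S.length < (S ++ b :: T').length := by simp
  rw [if_pos hlt, eraseIdx_append_len]
  simp

-- ---- basic preservation facts ----

lemma stepN_sorted (bs : List Int) (i : Int) (hs : bs.Pairwise (· ≤ ·)) :
    (stepN bs i).2.Pairwise (· ≤ ·) := by
  unfold stepN
  split <;> exact hs.sublist (List.eraseIdx_sublist ..)

lemma stepN_length (bs : List Int) (i : Int) (h : bs ≠ []) :
    (stepN bs i).2.length + 1 = bs.length := by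
  have hbs : 0 < bs.length := List.length_pos_iff.mpr h
  unfold stepN
  split <;> rw [List.length_eraseIdx] <;> split <;> omega

-- a sorted list splits into its ≤ x prefix and its > x suffix
lemma sorted_split (x : Int) (bs : List Int) (hs : bs.Pairwise (· ≤ ·)) :
    ∃ S T, bs = S ++ T ∧ (∀ b ∈ S, b ≤ x) ∧ (∀ b ∈ T, x < b) := by
  induction bs with
  | nil => exact ⟨[], [], rfl, by simp, by simp⟩
  | cons b bs ih =>
    obtain ⟨hb, hbs⟩ := List.pairwise_cons.mp hs
    by_cases hbx : b ≤ x
    · obtain ⟨S, T, rfl, h1, h2⟩ := ih hbs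
      refine ⟨b :: S, T, rfl, ?_, h2⟩
      intro s hsm
      rcases List.mem_cons.mp hsm with rfl | h
      · exact hbx
      · exact h1 s h
    · refine ⟨[], b :: bs, rfl, by simp, ?_⟩
      intro t ht
      rcases List.mem_cons.mp ht with rfl | h
      · exact lt_of_not_ge hbx
      · exact lt_of_lt_of_le (lt_of_not_ge hbx) (hb t h)

-- if every remaining element of B is ≤ every element of A, the tail of the loop adds nothing
lemma runN_zero (as bs : List Int)
    (hs : bs.Pairwise (· ≤ ·))
    (h : ∀ b ∈ bs, ∀ x ∈ as, b ≤ x) : runN as bs = 0 := by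
  induction as generalizing bs with
  | nil => rfl
  | cons i as ih =>
    have hstep := stepN_all_le bs i hs (fun b hb => h b hb i (by simp))
    simp only [runN, hstep, Nat.zero_add]
    exact ih _ (hs.sublist (List.eraseIdx_sublist ..))
      (fun b hb x hx => h b ((List.eraseIdx_sublist ..).subset hb) x (by simp [hx]))

-- elements ≤ every element of A act only as pop fodder: they can be dropped
lemma runN_junk (as : List Int) (S T : List Int)
    (ha : as.Pairwise (· ≤ ·))
    (hs : (S ++ T).Pairwise (· ≤ ·))
    (hS : ∀ s ∈ S, ∀ x ∈ as, s ≤ x) :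
    runN as (S ++ T) = runN as T := by
  induction as generalizing S T with
  | nil => rfl
  | cons i as ih =>
    have hah := List.pairwise_cons.mp ha
    have hTs : T.Pairwise (· ≤ ·) := hs.sublist (List.sublist_append_right S T)
    obtain ⟨T1, T2, rfl, h1, h2⟩ := sorted_split i T hTs
    have hSi : ∀ s ∈ S, s ≤ i := fun s hsm => hS s hsm i (List.mem_cons_self ..)
    have hST1 : ∀ s ∈ S ++ T1, s ≤ i := by
      intro s hsm
      rcases List.mem_append.mp hsm with h | h
      · exact hSi s h
      · exact h1 s h
    cases T2 with
    | nil =>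
      simp only [List.append_nil] at h1 hTs hs ⊢
      have hstep1 := stepN_all_le (S ++ T1) i hs (by simpa using hST1)
      have hstep2 := stepN_all_le T1 i hTs h1
      simp only [runN, hstep1, hstep2, Nat.zero_add]
      have hle : ∀ b ∈ S ++ T1, ∀ x ∈ as, b ≤ x := by
        intro b hb x hx
        exact le_trans (hST1 b hb) (hah.1 x hx)
      rw [runN_zero as _ (hs.sublist (List.eraseIdx_sublist ..))
            (fun b hb => hle b ((List.eraseIdx_sublist ..).subset hb)),
          runN_zero as _ (hTs.sublist (List.eraseIdx_sublist ..))
            (fun b hb => hle b (List.mem_append_right S ((List.eraseIdx_sublist ..).subset hb)))]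
    | cons v V =>
      have hs' : ((S ++ T1) ++ v :: V).Pairwise (· ≤ ·) := by rw [List.append_assoc]; exact hs
      have hstep1 := stepN_split_cons (S ++ T1) v V i hs' hST1 h2
      have hstep2 := stepN_split_cons T1 v V i (hs.sublist (List.sublist_append_right S _)) h1 h2
      rw [List.append_assoc] at hstep1
      simp only [runN, hstep1, hstep2]
      rw [List.append_assoc]
      have hsub : (S ++ (T1 ++ V)).Sublist (S ++ (T1 ++ v :: V)) :=
        ((List.sublist_cons_self v V).append_left T1).append_left S
      rw [ih S (T1 ++ V) hah.2 (hs.sublist hsub)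
           (fun s hsm x hx => hS s hsm x (List.mem_cons_of_mem i hx))]

-- elements ≤ the head can be skipped by the two-pointer scan
lemma tp_skip (a : Int) (as : List Int) (S rest : List Int) (hS : ∀ s ∈ S, s ≤ a) :
    tp (a :: as) (S ++ rest) = tp (a :: as) rest := by
  induction S with
  | nil => rfl
  | cons s S ih =>
    have hsa : ¬ a < s := not_lt.mpr (hS s (List.mem_cons_self ..))
    simp only [List.cons_append, tp, if_neg hsa]
    exact ih (fun t ht => hS t (List.mem_cons_of_mem s ht))

-- on sorted inputs the simulation equals the two-pointer count
lemma runN_eq_tp (as bs : List Int)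
    (ha : as.Pairwise (· ≤ ·)) (hs : bs.Pairwise (· ≤ ·)) :
    runN as bs = tp as bs := by
  induction as generalizing bs with
  | nil => rw [tp_nil]; rfl
  | cons a as ih =>
    have hah := List.pairwise_cons.mp ha
    obtain ⟨S, T, rfl, h1, h2⟩ := sorted_split a bs hs
    rw [tp_skip a as S T h1]
    cases T with
    | nil =>
      have hstep := stepN_all_le (S ++ []) a (by simpa using hs) (by simpa using h1)
      simp only [runN, hstep, Nat.zero_add]
      rw [runN_zero as _ ((by simpa using hs : (S ++ []).Pairwise _).sublist (List.eraseIdx_sublist ..))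
            (fun b hb x hx => le_trans (h1 b (by simpa using (List.eraseIdx_sublist ..).subset hb)) (hah.1 x hx))]
      rfl
    | cons b T' =>
      have hstep := stepN_split_cons S b T' a hs h1 h2
      have hsubT' : (S ++ T').Sublist (S ++ b :: T') := (List.sublist_cons_self b T').append_left S
      simp only [runN, hstep, tp, if_pos (h2 b (List.mem_cons_self ..))]
      rw [runN_junk as S T' hah.2 (hs.sublist hsubT')
            (fun s hsm x hx => le_trans (h1 s hsm) (hah.1 x hx)),
          ih T' hah.2 ((hs.sublist hsubT').sublist (List.sublist_append_right S T'))]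

-- ---- order-independence of A's loop over A ----

lemma swap_steps (x y : Int) (bs : List Int)
    (hs : bs.Pairwise (· ≤ ·)) (hlen : 2 ≤ bs.length) (hxy : x ≤ y) :
    (stepN bs x).1 + (stepN (stepN bs x).2 y).1 = (stepN bs y).1 + (stepN (stepN bs y).2 x).1
    ∧ (stepN (stepN bs x).2 y).2 = (stepN (stepN bs y).2 x).2 := by
  obtain ⟨Sy, T, rfl, hSy, hT⟩ := sorted_split y bs hs
  obtain ⟨S1, S2, hSyeq, h1, h2x⟩ := sorted_split x Sy (hs.sublist (List.sublist_append_left Sy T))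
  subst hSyeq
  have hTx : ∀ t ∈ T, x < t := fun t ht => lt_of_le_of_lt hxy (hT t ht)
  have hS2y : ∀ s ∈ S2, s ≤ y := fun s h => hSy s (List.mem_append_right S1 h)
  have hS1y : ∀ s ∈ S1, s ≤ y := fun s h => le_trans (h1 s h) hxy
  cases S2 with
  | nil =>
    cases T with
    | nil =>
      simp only [List.append_nil] at hs h1 ⊢
      have e1 := stepN_all_le S1 x hs h1
      have hsub := fun b (hb : b ∈ S1.eraseIdx 0) => (List.eraseIdx_sublist ..).subset hb
      have hse : (S1.eraseIdx 0).Pairwise (· ≤ ·) := hs.sublist (List.eraseIdx_sublist ..)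
      have e2 := stepN_all_le (S1.eraseIdx 0) y hse (fun b hb => le_trans (h1 b (hsub b hb)) hxy)
      have e3 := stepN_all_le S1 y hs (fun b hb => le_trans (h1 b hb) hxy)
      have e4 := stepN_all_le (S1.eraseIdx 0) x hse (fun b hb => h1 b (hsub b hb))
      rw [e1, e2, e3, e4]
      exact ⟨rfl, rfl⟩
    | cons v V =>
      simp only [List.append_nil] at hs hSy h1 ⊢
      have e1 := stepN_split_cons S1 v V x hs h1 hTx
      have e3 := stepN_split_cons S1 v V y hs hS1y hT
      rw [e1, e3]
      have hsV : (S1 ++ V).Pairwise (· ≤ ·) := hs.sublist ((List.sublist_cons_self v V).append_left S1)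
      cases V with
      | nil =>
        simp only [List.append_nil] at hsV ⊢
        have e2 := stepN_all_le S1 y hsV hS1y
        have e4 := stepN_all_le S1 x hsV h1
        rw [e2, e4]
        exact ⟨rfl, rfl⟩
      | cons w W =>
        have hwW : ∀ t ∈ w :: W, y < t := fun t ht => hT t (List.mem_cons_of_mem v ht)
        have e2 := stepN_split_cons S1 w W y hsV hS1y hwW
        have e4 := stepN_split_cons S1 w W x hsV h1 (fun t ht => lt_of_le_of_lt hxy (hwW t ht))
        rw [e2, e4]
        exact ⟨rfl, rfl⟩
  | cons u U =>
    have h2x' : ∀ s ∈ u :: U, x < s := h2x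
    cases T with
    | nil =>
      simp only [List.append_nil] at hs hSy ⊢
      have e1 := stepN_split_cons S1 u U x hs h1 h2x'
      have e2 := stepN_all_le (S1 ++ U) y
        (hs.sublist ((List.sublist_cons_self u U).append_left S1))
        (fun b hb => by
          rcases List.mem_append.mp hb with h | h
          · exact hS1y b h
          · exact hS2y b (List.mem_cons_of_mem u h))
      have e3 := stepN_all_le (S1 ++ u :: U) y hs hSy
      rw [e1, e2, e3]
      cases S1 with
      | nil =>
        simp only [List.nil_append, List.eraseIdx_cons_zero]
        cases U with
        | nil => simp at hlen
        | cons w W =>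
          have e4 := stepN_split_cons [] w W x
            ((hs.sublist ((List.sublist_cons_self u (w :: W)))) : (w :: W).Pairwise _)
            (by simp)
            (fun t ht => h2x' t (List.mem_cons_of_mem u ht))
          simp only [List.nil_append] at e4 ⊢
          rw [e4]
          exact ⟨rfl, rfl⟩
      | cons s0 S1' =>
        simp only [List.cons_append, List.eraseIdx_cons_zero]
        have hsub : (S1' ++ u :: U).Sublist (s0 :: S1' ++ u :: U) := by
          simp [List.cons_append]
        have e4 := stepN_split_cons S1' u U x (hs.sublist hsub)
          (fun t ht => h1 t (List.mem_cons_of_mem s0 ht)) h2x'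
        rw [e4]
        exact ⟨rfl, rfl⟩
    | cons v V =>
      have hsA : (S1 ++ u :: (U ++ v :: V)).Pairwise (· ≤ ·) := by
        simpa [List.append_assoc] using hs
      have hmix : ∀ t ∈ u :: (U ++ v :: V), x < t := by
        intro t ht
        rcases List.mem_cons.mp ht with rfl | ht'
        · exact h2x' t (List.mem_cons_self ..)
        · rcases List.mem_append.mp ht' with h | h
          · exact h2x' t (List.mem_cons_of_mem u h)
          · exact hTx t h
      have hbs_eq : (S1 ++ u :: U) ++ v :: V = S1 ++ u :: (U ++ v :: V) := by
        simp [List.append_assoc]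
      rw [hbs_eq]
      have e1 := stepN_split_cons S1 u (U ++ v :: V) x hsA h1 hmix
      rw [e1]
      have hs2shape : S1 ++ (U ++ v :: V) = (S1 ++ U) ++ v :: V := by
        simp [List.append_assoc]
      have hsB : ((S1 ++ U) ++ v :: V).Pairwise (· ≤ ·) := by
        rw [← hs2shape]
        exact hsA.sublist ((List.sublist_cons_self u _).append_left S1)
      have e2 := stepN_split_cons (S1 ++ U) v V y hsB
        (fun b hb => by
          rcases List.mem_append.mp hb with h | h
          · exact hS1y b h
          · exact hS2y b (List.mem_cons_of_mem u h))
        hT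
      rw [hs2shape, e2]
      have e3 := stepN_split_cons (S1 ++ u :: U) v V y (by rw [hbs_eq]; exact hsA) hSy hT
      rw [hbs_eq] at e3
      rw [e3]
      have hs4shape : (S1 ++ u :: U) ++ V = S1 ++ u :: (U ++ V) := by
        simp [List.append_assoc]
      have hsC : (S1 ++ u :: (U ++ V)).Pairwise (· ≤ ·) := by
        refine hsA.sublist ?_
        refine List.Sublist.append_left ?_ S1
        exact (((List.sublist_cons_self v V).append_left U).cons₂ u)
      have hmix2 : ∀ t ∈ u :: (U ++ V), x < t := by
        intro t ht
        rcases List.mem_cons.mp ht with rfl | ht'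
        · exact h2x' t (List.mem_cons_self ..)
        · rcases List.mem_append.mp ht' with h | h
          · exact h2x' t (List.mem_cons_of_mem u h)
          · exact hTx t (List.mem_cons_of_mem v h)
      have e4 := stepN_split_cons S1 u (U ++ V) x hsC h1 hmix2
      rw [hs4shape, e4]
      constructor
      · rfl
      · simp [List.append_assoc]

lemma runN_swap (x y : Int) (l bs : List Int)
    (hs : bs.Pairwise (· ≤ ·)) (hlen : 2 ≤ bs.length) :
    runN (x :: y :: l) bs = runN (y :: x :: l) bs := by
  rcases le_total x y with h | h
  · obtain ⟨hc, hl⟩ := swap_steps x y bs hs hlen h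
    simp only [runN, hl]
    omega
  · obtain ⟨hc, hl⟩ := swap_steps y x bs hs hlen h
    simp only [runN, hl]
    omega

lemma runN_perm {l l' : List Int} (h : l.Perm l') :
    ∀ bs : List Int, bs.Pairwise (· ≤ ·) → l.length ≤ bs.length →
      runN l bs = runN l' bs := by
  induction h with
  | nil => intro bs _ _; rfl
  | cons z h ih =>
    intro bs hsb hlen
    have hne : bs ≠ [] := by
      intro hbs; rw [hbs] at hlen; simp at hlen
    simp only [runN]
    rw [ih _ (stepN_sorted bs z hsb) (by have := stepN_length bs z hne; simp at hlen; omega)]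
  | swap u v l =>
    intro bs hsb hlen
    exact (runN_swap u v l bs hsb (by simp at hlen; omega)).symm
  | trans h1 h2 ih1 ih2 =>
    intro bs hsb hlen
    rw [ih1 bs hsb hlen, ih2 bs hsb (by rw [← h1.length_eq]; exact hlen)]

-- ---- bridges between the ports and the recursions ----

lemma foldA (as : List Int) : ∀ (c : Int) (bs : List Int),
    (as.foldl stepA (c, bs)).1 = c + (runN as bs : Int) := by
  induction as with
  | nil => intro c bs; simp [runN]
  | cons i as ih =>
    intro c bs
    have hstep : stepA (c, bs) i = (c + ((stepN bs i).1 : Int), (stepN bs i).2) := by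
      unfold stepA stepN
      split <;> rename_i hcond <;> simp [hcond]
    simp only [List.foldl_cons, runN, hstep, ih]
    push_cast
    ring

lemma foldB (a : List Int) (bs : List Int) : ∀ c : Nat,
    bs.foldl (stepB a) c = c + tp (a.drop c) bs := by
  induction bs with
  | nil => intro c; simp [tp]
  | cons x bs ih =>
    intro c
    simp only [List.foldl_cons, stepB]
    by_cases h : c < a.length ∧ a.getD c 0 < x
    · rw [if_pos h, ih, List.drop_eq_getElem_cons h.1]
      have hx : a[c]'h.1 < x := by
        have h2 := h.2
        rwa [List.getD_eq_getElem a 0 h.1] at h2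
      simp only [tp, if_pos hx]
      omega
    · rw [if_neg h, ih]
      by_cases hc : c < a.length
      · have hx : ¬ a[c] < x := fun hlt => h ⟨hc, by rwa [List.getD_eq_getElem a 0 hc]⟩
        rw [List.drop_eq_getElem_cons hc]
        simp [tp, if_neg hx]
      · rw [List.drop_eq_nil_of_le (le_of_not_gt hc)]
        simp [tp_nil]

-- ===== VERDICT (by name: the statement is the Claim_ definition above) =====
theorem solution_spec : Claim_equal_solution := by
  intro A B _ hpre
  unfold Spec_solution solution solution_alt
  have hsB := PySem.List.sorted_pairwise B (fun v => v)
  have hsA := PySem.List.sorted_pairwise A (fun v => v)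
  have h1 : (A.foldl stepA (0, PySem.List.sorted B (fun b => b))).1
      = (runN A (PySem.List.sorted B (fun b => b)) : Int) := by
    simpa using foldA A 0 (PySem.List.sorted B (fun b => b))
  have hperm : A.Perm (PySem.List.sorted A (fun v => v)) :=
    (PySem.List.sorted_perm A (fun v => v) false).symm
  have hlen : A.length ≤ (PySem.List.sorted B (fun v => v)).length := by
    rw [PySem.List.length_sorted]; exact hpre
  have h2 := runN_perm hperm (PySem.List.sorted B (fun v => v)) hsB hlen
  have h3 := runN_eq_tp (PySem.List.sorted A (fun v => v)) (PySem.List.sorted B (fun v => v)) hsA hsB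
  have h4 := foldB (PySem.List.sorted A (fun v => v)) (PySem.List.sorted B (fun v => v)) 0
  simp only [List.drop_zero, Nat.zero_add] at h4
  rw [h1, h2, h3, ← h4]
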